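-- pv_equiv track=rewrite | github.com/leonardozilli/nanoGBT | common/eval.py | _pattern_signature
-- ===== SOURCE A (Python) =====
-- def _pattern_signature(sequence: str):
--     mapping = {}
--     next_code = ord("A")
--     signature = []
--
--     for symbol in sequence:
--         if symbol not in mapping:
--             mapping[symbol] = chr(next_code)
--             next_code += 1
--         signature.append(mapping[symbol])
--
--     return "".join(signature)
-- ===== SOURCE B (Python) =====
-- def _pattern_signature(sequence: str):
--     out = [""] * len(sequence)
--     for code, symbol in enumerate(sorted(set(sequence), key=sequence.find)):
--         label = chr(ord("A") + code)
--         for j, x in enumerate(sequence):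
--             if x == symbol:
--                 out[j] = label
--     return "".join(out)
-- ===== Notes on version B (the rewrite author's own statement) =====
-- stated objective: alternative
-- what changed: A's single pass that lazily grows a symbol-to-letter dict and appends per character is replaced by a scatter algorithm with no lookup structure at all: the distinct symbols are ordered by sorting set(sequence) by first-occurrence position, and each symbol's letter is then written over all of its positions in the preallocated output array by a nested scan.
import Mathlib
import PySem

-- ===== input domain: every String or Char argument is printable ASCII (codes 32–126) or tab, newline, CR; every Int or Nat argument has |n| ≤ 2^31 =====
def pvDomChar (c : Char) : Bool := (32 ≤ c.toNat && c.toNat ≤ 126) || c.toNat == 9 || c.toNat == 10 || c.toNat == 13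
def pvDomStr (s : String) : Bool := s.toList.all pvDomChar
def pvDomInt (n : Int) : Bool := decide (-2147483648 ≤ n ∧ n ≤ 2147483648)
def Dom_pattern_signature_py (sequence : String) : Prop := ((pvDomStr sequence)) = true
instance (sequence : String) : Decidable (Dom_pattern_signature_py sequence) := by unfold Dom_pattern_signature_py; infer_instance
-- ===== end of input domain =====

-- B replaces A's lazily-grown symbol-to-letter dict by a scatter algorithm with no lookup
-- structure: sort set(sequence) by first-occurrence position, then write each symbol's
-- letter over all of its positions in a preallocated output array; objective: alternative.

-- ===== PORT A =====
-- one loop iteration of A: state = (mapping, next_code, signature)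
def pvStepA (st : PySem.Dict Char Char × Int × List Char) (symbol : Char) :
    PySem.Dict Char Char × Int × List Char :=
  if st.1.contains symbol then
    (st.1, st.2.1, st.2.2 ++ [(st.1.get? symbol).getD 'A'])
  else
    let m' := st.1.insert symbol (Char.ofNat st.2.1.toNat)
    (m', st.2.1 + 1, st.2.2 ++ [(m'.get? symbol).getD 'A'])

def pattern_signature_py (sequence : String) : String :=
  let st := sequence.toList.foldl pvStepA (PySem.Dict.empty, (65 : Int), ([] : List Char))
  String.ofList st.2.2

-- ===== PORT B =====
-- out is a list of strings ("" placeholder / one-letter label), as in the Python;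
-- sorted(set(sequence), key=sequence.find): the key (first-occurrence position) is
-- injective on the set, so PySem.Set order is immaterial
def pattern_signature_py_alt (sequence : String) : String :=
  let L := sequence.toList
  let out0 : List (List Char) := List.replicate L.length []
  let out :=
    (PySem.List.enumerate
        (PySem.List.sorted (PySem.Set.ofList L) (fun c => PySem.Chars.find L [c]) false)).foldl
      (fun out p =>
        let label := Char.ofNat (65 + p.1).toNat
        (PySem.List.enumerate L).foldl
          (fun o q => if q.2 == p.2 then PySem.List.pySetD o q.1 [label] else o) out)
      out0
  String.ofList out.flatten

-- ===== PRECONDITION & SPEC =====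
def Spec_pattern_signature_py (sequence : String) (out : String) : Prop := out = pattern_signature_py_alt sequence
instance (sequence : String) (out : String) : Decidable (Spec_pattern_signature_py sequence out) := by unfold Spec_pattern_signature_py; infer_instance

-- ===== CLAIM (what is proved, stated in full; the proofs are below) =====
def Claim_equal_pattern_signature_py : Prop := ∀ (sequence : String), Dom_pattern_signature_py sequence → Spec_pattern_signature_py sequence (pattern_signature_py sequence)

-- ===== LEMMAS AND PROOFS =====

-- Set.update only appends: u is a prefix of u.update xs
lemma pvUpdate_append (xs : List Char) (u : PySem.Set Char) :
    ∃ v, PySem.Set.update u xs = u ++ v := by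
  induction xs generalizing u with
  | nil => exact ⟨[], by simp [PySem.Set.update_nil]⟩
  | cons x xs ih =>
    rw [PySem.Set.update_cons]
    by_cases hx : x ∈ u
    · rw [PySem.Set.add_of_mem hx]; exact ih u
    · rw [PySem.Set.add_of_not_mem hx]
      obtain ⟨v, hv⟩ := ih (u ++ [x])
      exact ⟨[x] ++ v, by rw [hv, List.append_assoc]⟩

lemma pvOfList_eq_update_nil (xs : List Char) :
    PySem.Set.ofList xs = PySem.Set.update [] xs := by
  rw [PySem.Set.ofList_eq_foldl]
  induction xs with
  | nil => rw [PySem.Set.update_nil]; rfl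
  | cons x xs ih => rfl

-- the code a symbol receives, as a function of the first-occurrence list
def pvCode (u : List Char) (c : Char) : Char := Char.ofNat (65 + u.idxOf c)

-- A's loop invariant: if mapping m realises pvCode on the seen-set u and next_code = 65 + |u|,
-- the loop appends exactly the pvCode translations w.r.t. the final seen-set u.update L
lemma pvA_loop (L : List Char) (u : PySem.Set Char) (m : PySem.Dict Char Char)
    (n : Int) (sig : List Char)
    (hnd : u.Nodup)
    (hget : ∀ c, m.get? c = if c ∈ u then some (pvCode u c) else none)
    (hn : n = 65 + u.length) :
    (L.foldl pvStepA (m, n, sig)).2.2 =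
      sig ++ L.map (fun c => pvCode (PySem.Set.update u L) c) := by
  induction L generalizing u m n sig with
  | nil => simp [PySem.Set.update_nil]
  | cons c rest ih =>
    rw [List.foldl_cons, List.map_cons, PySem.Set.update_cons]
    by_cases hc : c ∈ u
    · have hcontains : m.contains c = true := by
        rw [PySem.Dict.contains_eq_isSome_get?, hget c, if_pos hc]; rfl
      have hstep : pvStepA (m, n, sig) c =
          (m, n, sig ++ [(m.get? c).getD 'A']) := by
        simp [pvStepA, hcontains]
      rw [hstep, PySem.Set.add_of_mem hc,
        ih u m n _ hnd hget hn]
      have hcode : (m.get? c).getD 'A' = pvCode (PySem.Set.update u rest) c := by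
        rw [hget c, if_pos hc]
        obtain ⟨v, hv⟩ := pvUpdate_append rest u
        simp [pvCode, hv, List.idxOf_append_of_mem hc]
      rw [hcode, List.append_assoc]; rfl
    · have hcontains : m.contains c = false := by
        rw [PySem.Dict.contains_eq_isSome_get?, hget c, if_neg hc]; rfl
      have hstep : pvStepA (m, n, sig) c =
          (m.insert c (Char.ofNat n.toNat), n + 1,
            sig ++ [((m.insert c (Char.ofNat n.toNat)).get? c).getD 'A']) := by
        simp [pvStepA, hcontains]
      have hnat : n.toNat = 65 + u.length := by omega
      rw [hstep, PySem.Set.add_of_not_mem hc]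
      have hnd' : (u ++ [c]).Nodup := by
        simp [List.nodup_append, hnd]
        exact fun a ha h => hc (h ▸ ha)
      have hget' : ∀ x, (m.insert c (Char.ofNat n.toNat)).get? x =
          if x ∈ u ++ [c] then some (pvCode (u ++ [c]) x) else none := by
        intro x
        by_cases hxc : x = c
        · subst hxc
          rw [PySem.Dict.get?_insert_self, if_pos (by simp)]
          simp [pvCode, List.idxOf_append_of_notMem hc, hnat]
        · rw [PySem.Dict.get?_insert_of_ne _ _ hxc, hget x]
          by_cases hxu : x ∈ u
          · rw [if_pos hxu, if_pos (by simp [hxu])]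
            simp [pvCode, List.idxOf_append_of_mem hxu]
          · rw [if_neg hxu, if_neg (by simp [hxu, hxc])]
      rw [ih (u ++ [c]) _ (n + 1) _ hnd' hget' (by simp; omega)]
      have hcode : ((m.insert c (Char.ofNat n.toNat)).get? c).getD 'A' =
          pvCode (PySem.Set.update (u ++ [c]) rest) c := by
        rw [PySem.Dict.get?_insert_self]
        obtain ⟨v, hv⟩ := pvUpdate_append rest (u ++ [c])
        have hcm : c ∈ u ++ [c] := by simp
        simp [pvCode, hv, List.idxOf_append_of_notMem hc, hnat]
      rw [hcode, List.append_assoc]; rfl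

-- single-character find in Python is first-occurrence index
lemma pvFind_go (c : Char) : ∀ (L : List Char) (i : Nat), c ∈ L →
    PySem.Chars.find.go [c] L i = ((i + L.idxOf c : Nat) : Int) := by
  intro L
  induction L with
  | nil => intro i h; cases h
  | cons x xs ih =>
    intro i h
    by_cases hxc : x = c
    · subst hxc
      have hpre : [x] <+: x :: xs := by simp [List.cons_prefix_cons]
      simp [PySem.Chars.find.go, List.idxOf_cons_self]
    · have hc' : c ∈ xs := by cases h with
        | head => exact absurd rfl hxc
        | tail _ hh => exact hh
      have hpre : ¬ ([c] <+: x :: xs) := by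
        simp [List.cons_prefix_cons]
        intro hcx; exact hxc hcx.symm
      rw [List.idxOf_cons_ne _ (fun he => hxc he)]
      rw [show PySem.Chars.find.go [c] (x :: xs) i = PySem.Chars.find.go [c] xs (i + 1) by
        simp [PySem.Chars.find.go, hpre]]
      rw [ih (i + 1) hc']
      congr 1
      omega

lemma pvFind_single (L : List Char) (c : Char) (hc : c ∈ L) :
    PySem.Chars.find L [c] = (L.idxOf c : Int) := by
  rw [show PySem.Chars.find L [c] = PySem.Chars.find.go [c] L 0 from rfl, pvFind_go c L 0 hc]
  simp

lemma pvOfList_append_singleton (pre : List Char) (x : Char) :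
    PySem.Set.ofList (pre ++ [x]) = PySem.Set.add (PySem.Set.ofList pre) x := by
  simp [PySem.Set.ofList_eq_foldl, List.foldl_append]

-- dedup order is first-occurrence order: idxOf is strictly increasing along Set.ofList L
lemma pvPW_aux (L : List Char) : ∀ (xs pre : List Char), pre ++ xs = L →
    (PySem.Set.ofList pre).Pairwise (fun a b => L.idxOf a < L.idxOf b) →
    (PySem.Set.update (PySem.Set.ofList pre) xs).Pairwise
      (fun a b => L.idxOf a < L.idxOf b) := by
  intro xs
  induction xs with
  | nil => intro pre hL hpw; rw [PySem.Set.update_nil]; exact hpw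
  | cons x xs ih =>
    intro pre hL hpw
    rw [PySem.Set.update_cons, ← pvOfList_append_singleton]
    apply ih (pre ++ [x]) (by simpa using hL)
    rw [pvOfList_append_singleton]
    by_cases hx : x ∈ PySem.Set.ofList pre
    · rw [PySem.Set.add_of_mem hx]; exact hpw
    · rw [PySem.Set.add_of_not_mem hx]
      have hxpre : x ∉ pre := fun h => hx ((PySem.Set.mem_ofList _ _).mpr h)
      rw [List.pairwise_append]
      refine ⟨hpw, List.pairwise_singleton _ _, ?_⟩
      intro a ha b hb
      have hb' : b = x := by simpa using hb
      rw [hb']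
      have hapre : a ∈ pre := (PySem.Set.mem_ofList _ _).mp ha
      have h1 : L.idxOf a < pre.length := by
        rw [← hL, List.idxOf_append_of_mem hapre]
        exact List.idxOf_lt_length_of_mem hapre
      have h2 : L.idxOf x = pre.length := by
        rw [← hL, List.idxOf_append_of_notMem hxpre, List.idxOf_cons_self]; omega
      omega

lemma pvPW (L : List Char) :
    (PySem.Set.ofList L).Pairwise (fun a b => L.idxOf a < L.idxOf b) := by
  have h := pvPW_aux L L [] rfl (by simp [PySem.Set.ofList])
  have h0 : PySem.Set.ofList ([] : List Char) = [] := rfl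
  rw [h0] at h
  rwa [← pvOfList_eq_update_nil] at h

-- B's sorted(set(L), key=L.find) is exactly the first-occurrence dedup list
lemma pvSorted_eq_dedup (L : List Char) :
    PySem.List.sorted (PySem.Set.ofList L) (fun c => PySem.Chars.find L [c]) false =
      PySem.List.dedup L := by
  rw [PySem.List.dedup_eq_ofList]
  apply PySem.List.sorted_eq_of_perm_of_pairwise_lt
  · exact List.Perm.refl _
  · apply List.Pairwise.imp_of_mem (l := PySem.Set.ofList L)
      (R := fun a b => L.idxOf a < L.idxOf b)
    · intro a b ha hb hab
      have ha' : a ∈ L := (PySem.Set.mem_ofList _ _).mp ha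
      have hb' : b ∈ L := (PySem.Set.mem_ofList _ _).mp hb
      simp only [pvFind_single L a ha', pvFind_single L b hb']
      exact_mod_cast hab
    · exact pvPW L

-- inner scatter pass, in map form: writing [lab] at every position holding c
lemma pvInner (c lab : Char) :
    ∀ (M : List Char) (s : Int) (done : List (List Char)) (g : Char → List Char),
      0 ≤ s → done.length = s.toNat →
      (PySem.List.enumerate M s).foldl
          (fun o q => if q.2 == c then PySem.List.pySetD o q.1 [lab] else o)
          (done ++ M.map g) =
        done ++ M.map (fun x => if x = c then [lab] else g x) := by
  intro M
  induction M with
  | nil => intro s done g hs hd; simp [PySem.List.enumerate_nil]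
  | cons x M ih =>
    intro s done g hs hd
    rw [PySem.List.enumerate_cons, List.map_cons, List.map_cons, List.foldl_cons]
    by_cases hxc : x = c
    · have hset : (if x == c then PySem.List.pySetD (done ++ g x :: M.map g) s [lab]
          else done ++ g x :: M.map g) = (done ++ [[lab]]) ++ M.map g := by
        rw [if_pos (by simp [hxc]), PySem.List.pySetD_of_nonneg (h := hs), ← hd]
        simp
      rw [hset, ih (s + 1) (done ++ [[lab]]) g (by omega) (by simp [hd]; omega)]
      simp [hxc]
    · have hskip : (if x == c then PySem.List.pySetD (done ++ g x :: M.map g) s [lab]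
          else done ++ g x :: M.map g) = (done ++ [g x]) ++ M.map g := by
        rw [if_neg (by simp [hxc])]; simp
      rw [hskip, ih (s + 1) (done ++ [g x]) g (by omega) (by simp [hd]; omega)]
      simp [hxc]

-- outer scatter pass: after processing the enumerated symbol list V (labels from 65+s),
-- every position holding a symbol of V carries its label
lemma pvOuter (L : List Char) :
    ∀ (V : List Char) (s : Int) (g : Char → List Char), V.Nodup → 0 ≤ s →
      (PySem.List.enumerate V s).foldl
          (fun out p =>
            (PySem.List.enumerate L).foldl
              (fun o q => if q.2 == p.2 then PySem.List.pySetD o q.1 [Char.ofNat (65 + p.1).toNat] else o) out)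
          (L.map g) =
        L.map (fun x => if x ∈ V then [Char.ofNat (65 + s + (V.idxOf x : Int)).toNat] else g x) := by
  intro V
  induction V with
  | nil => intro s g _ _; simp [PySem.List.enumerate_nil]
  | cons v V ih =>
    intro s g hnd hs
    rw [PySem.List.enumerate_cons, List.foldl_cons]
    have hinner := pvInner v (Char.ofNat (65 + s).toNat) L 0 [] g (by omega) rfl
    rw [List.nil_append] at hinner
    rw [hinner, List.nil_append]
    rw [ih (s + 1) _ (List.nodup_cons.mp hnd).2 (by omega)]
    apply List.map_congr_left
    intro x hx
    by_cases hxv : x = v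
    · subst hxv
      have hnv : x ∉ V := (List.nodup_cons.mp hnd).1
      rw [if_neg hnv, if_pos rfl, if_pos (by simp)]
      simp [List.idxOf_cons_self]
    · by_cases hxV : x ∈ V
      · rw [if_pos hxV, if_pos (by simp [hxV])]
        have : ((v :: V).idxOf x : Int) = (V.idxOf x : Int) + 1 := by
          rw [List.idxOf_cons_ne _ (by simpa using Ne.symm hxv)]
          push_cast; ring
        rw [this]
        congr 2
        omega
      · rw [if_neg hxV, if_neg hxv, if_neg (by simp [hxv, hxV])]

lemma pvFlatten_map_singleton (L : List Char) (f : Char → Char) :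
    (L.map (fun x => [f x])).flatten = L.map f := by
  induction L with
  | nil => rfl
  | cons x xs ih => simp [ih]

-- ===== VERDICT (by name: the statement is the Claim_ definition above) =====
theorem pattern_signature_py_spec : Claim_equal_pattern_signature_py := by
  intro sequence _
  unfold Spec_pattern_signature_py
  simp only [pattern_signature_py, pattern_signature_py_alt]
  have hA := pvA_loop sequence.toList [] PySem.Dict.empty 65 []
    (by simp) (fun c => by rfl) (by simp)
  rw [hA, List.nil_append]
  rw [pvSorted_eq_dedup]
  have hrepl : List.replicate sequence.toList.length ([] : List Char) =
      sequence.toList.map (fun _ => []) := by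
    rw [List.map_const']
  rw [hrepl, pvOuter sequence.toList (PySem.List.dedup sequence.toList) 0
    (fun _ => []) (PySem.List.nodup_dedup _) (by omega)]
  have hmap : sequence.toList.map
      (fun x => if x ∈ PySem.List.dedup sequence.toList
        then [Char.ofNat (65 + 0 + (((PySem.List.dedup sequence.toList).idxOf x : Int))).toNat]
        else ([] : List Char)) =
      sequence.toList.map (fun x => [pvCode (PySem.List.dedup sequence.toList) x]) := by
    apply List.map_congr_left
    intro x hx
    rw [if_pos ((PySem.List.mem_dedup _ _).mpr hx)]
    simp only [pvCode]
    norm_num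
    congr 1
  rw [hmap, pvFlatten_map_singleton]
  have hsets : PySem.Set.update ([] : List Char) sequence.toList =
      PySem.List.dedup sequence.toList := by
    rw [PySem.List.dedup_eq_ofList, pvOfList_eq_update_nil]
  rw [hsets]
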